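-- pv_equiv track=rewrite | github.com/RisingSparks/community-matchbot | src/matchbot/taxonomy.py | _canonicalize_terms
-- ===== SOURCE A (Python) =====
-- def _canonicalize_terms(raw: list[str], allowed: frozenset[str]) -> tuple[list[str], list[str]]:
--     canonical: list[str] = []
--     other: list[str] = []
--     seen_canonical: set[str] = set()
--     seen_other: set[str] = set()
--
--     for value in raw:
--         cleaned = value.strip().lower()
--         if not cleaned:
--             continue
--         if cleaned in allowed:
--             if cleaned not in seen_canonical:
--                 canonical.append(cleaned)
--                 seen_canonical.add(cleaned)
--         elif cleaned not in seen_other: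
--             other.append(cleaned)
--             seen_other.add(cleaned)
--
--     return canonical, other
-- ===== SOURCE B (Python) =====
-- def _canonicalize_terms(raw: list[str], allowed: frozenset[str]) -> tuple[list[str], list[str]]:
--     # Phase 1: clean + drop empties, then order-preserving dedup (first occurrences).
--     unique = list(dict.fromkeys(c for v in raw if (c := v.strip().lower())))
--     # Phase 2: two membership partition passes.
--     canonical = [c for c in unique if c in allowed]
--     other = [c for c in unique if c not in allowed]
--     return canonical, other
-- ===== Notes on version B (the rewrite author's own statement) =====
-- stated objective: simpler
-- what changed: Replaces A's single fused loop with four pieces of mutable state (two output lists plus two seen-sets) by a two-phase pipeline: one dict.fromkeys dedup of the cleaned non-empty terms, then two stateless membership filters.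
import Mathlib
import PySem

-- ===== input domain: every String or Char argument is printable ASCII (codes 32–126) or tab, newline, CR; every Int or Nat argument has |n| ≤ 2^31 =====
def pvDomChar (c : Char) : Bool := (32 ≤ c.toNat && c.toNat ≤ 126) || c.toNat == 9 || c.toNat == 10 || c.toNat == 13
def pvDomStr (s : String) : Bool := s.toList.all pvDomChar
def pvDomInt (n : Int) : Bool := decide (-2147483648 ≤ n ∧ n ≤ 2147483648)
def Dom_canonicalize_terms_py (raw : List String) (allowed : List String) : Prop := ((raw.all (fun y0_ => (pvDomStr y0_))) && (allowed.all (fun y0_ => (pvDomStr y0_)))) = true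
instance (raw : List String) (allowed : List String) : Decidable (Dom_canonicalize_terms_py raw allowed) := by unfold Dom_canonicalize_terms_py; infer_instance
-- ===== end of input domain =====

-- B: two-phase pipeline (dedup of cleaned terms, then two membership filters) instead of A's fused
-- loop with two seen-sets; simpler decomposition, same return value (no side effects involved).

-- ===== PORT A =====
def canonicalize_terms_py (raw : List String) (allowed : List String) : List String × List String :=
  let st := raw.foldl (fun (st : List String × List String × PySem.Set String × PySem.Set String) value =>
    let (canonical, other, seen_canonical, seen_other) := st
    let cleaned := PySem.Str.lower (PySem.Str.strip value)
    if cleaned == "" then st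
    else if allowed.contains cleaned then
      if !seen_canonical.contains cleaned then
        (canonical ++ [cleaned], other, PySem.Set.add seen_canonical cleaned, seen_other)
      else st
    else if !seen_other.contains cleaned then
      (canonical, other ++ [cleaned], seen_canonical, PySem.Set.add seen_other cleaned)
    else st) ([], [], [], [])
  (st.1, st.2.1)

-- ===== PORT B =====
def canonicalize_terms_py_alt (raw : List String) (allowed : List String) : List String × List String :=
  let unique := PySem.List.dedup
    ((raw.map (fun v => PySem.Str.lower (PySem.Str.strip v))).filter (fun c => !(c == "")))
  (unique.filter (fun c => allowed.contains c), unique.filter (fun c => !allowed.contains c))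

-- ===== PRECONDITION & SPEC =====
def Spec_canonicalize_terms_py (raw : List String) (allowed : List String) (out : List String × List String) : Prop := out = canonicalize_terms_py_alt raw allowed
instance (raw : List String) (allowed : List String) (out : List String × List String) : Decidable (Spec_canonicalize_terms_py raw allowed out) := by unfold Spec_canonicalize_terms_py; infer_instance

-- ===== CLAIM (what is proved, stated in full; the proofs are below) =====
def Claim_equal_canonicalize_terms_py : Prop := ∀ (raw : List String) (allowed : List String), Dom_canonicalize_terms_py raw allowed → Spec_canonicalize_terms_py raw allowed (canonicalize_terms_py raw allowed)

-- ===== LEMMAS AND PROOFS =====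

-- proof-side name for A's loop body, applied to an already-cleaned term
def pvStep (allowed : List String)
    (st : List String × List String × PySem.Set String × PySem.Set String) (c : String) :
    List String × List String × PySem.Set String × PySem.Set String :=
  if c == "" then st
  else if allowed.contains c then
    if !(PySem.Set.contains st.2.2.1 c) then (st.1 ++ [c], st.2.1, PySem.Set.add st.2.2.1 c, st.2.2.2)
    else st
  else if !(PySem.Set.contains st.2.2.2 c) then (st.1, st.2.1 ++ [c], st.2.2.1, PySem.Set.add st.2.2.2 c)
  else st

theorem fold_skip_empty (allowed : List String) : ∀ (cs : List String)
    (init : List String × List String × PySem.Set String × PySem.Set String),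
    cs.foldl (pvStep allowed) init = (cs.filter (fun c => !(c == ""))).foldl (pvStep allowed) init := by
  intro cs
  induction cs with
  | nil => intro init; rfl
  | cons c rest ih =>
    intro init
    rw [List.foldl_cons, List.filter_cons]
    by_cases h : (c == "") = true
    · have hstep : pvStep allowed init c = init := by simp [pvStep, h]
      rw [hstep, ih, if_neg (by simp [h])]
    · rw [if_pos (by simp [h]), List.foldl_cons, ih]

-- on states whose seen-sets equal the output lists, A's loop is a pair of per-bucket Set-folds
theorem fold_g (allowed : List String) : ∀ (cs : List String) (can oth : List String),
    (∀ c ∈ cs, (c == "") = false) →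
    cs.foldl (pvStep allowed) (can, oth, can, oth) =
      ((cs.filter (fun c => allowed.contains c)).foldl PySem.Set.add can,
       (cs.filter (fun c => !allowed.contains c)).foldl PySem.Set.add oth,
       (cs.filter (fun c => allowed.contains c)).foldl PySem.Set.add can,
       (cs.filter (fun c => !allowed.contains c)).foldl PySem.Set.add oth) := by
  intro cs
  induction cs with
  | nil => intro can oth _; rfl
  | cons c rest ih =>
    intro can oth hne
    have h0 : ¬ c = "" := by simpa using hne c (by simp)
    have hrest : ∀ d ∈ rest, (d == "") = false := fun d hd => hne d (by simp [hd])
    by_cases hp : allowed.contains c = true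
    · rw [List.foldl_cons, List.filter_cons_of_pos (by simpa using hp),
        List.filter_cons_of_neg (by simpa using hp), List.foldl_cons]
      have hp' : c ∈ allowed := by simpa using hp
      have hg : pvStep allowed (can, oth, can, oth) c = (PySem.Set.add can c, oth, PySem.Set.add can c, oth) := by
        by_cases hc : c ∈ can
        · simp [pvStep, PySem.Set.add, PySem.Set.contains, h0, hp', hc]
        · simp [pvStep, PySem.Set.add, PySem.Set.contains, h0, hp', hc]
      rw [hg, ih _ _ hrest]
    · rw [List.foldl_cons, List.filter_cons_of_neg (by simpa using hp),
        List.filter_cons_of_pos (by simpa using hp), List.foldl_cons]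
      have hp' : c ∉ allowed := by simpa using hp
      have hg : pvStep allowed (can, oth, can, oth) c = (can, PySem.Set.add oth c, can, PySem.Set.add oth c) := by
        by_cases hc : c ∈ oth
        · simp [pvStep, PySem.Set.add, PySem.Set.contains, h0, hp', hc]
        · simp [pvStep, PySem.Set.add, PySem.Set.contains, h0, hp', hc]
      rw [hg, ih _ _ hrest]

-- filter commutes with set-building (first occurrences are preserved in either order)
theorem filter_foldl_add (p : String → Bool) : ∀ (xs : List String) (s : List String),
    (xs.foldl PySem.Set.add s).filter p = (xs.filter p).foldl PySem.Set.add (s.filter p) := by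
  intro xs
  induction xs with
  | nil => intro s; rfl
  | cons x rest ih =>
    intro s
    rw [List.foldl_cons, ih, List.filter_cons]
    by_cases hp : p x = true
    · rw [if_pos (by simpa using hp), List.foldl_cons]
      have : (PySem.Set.add s x).filter p = PySem.Set.add (s.filter p) x := by
        by_cases hc : x ∈ s
        · have hc2 : x ∈ s.filter p := List.mem_filter.mpr ⟨hc, hp⟩
          simp [PySem.Set.add, PySem.Set.contains, hc, hc2]
        · have hc2 : x ∉ s.filter p := fun h => hc (List.mem_filter.mp h).1
          simp [PySem.Set.add, PySem.Set.contains, hc, hc2, List.filter_append, hp]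
      rw [this]
    · rw [if_neg (by simpa using hp)]
      have : (PySem.Set.add s x).filter p = s.filter p := by
        by_cases hc : x ∈ s
        · simp [PySem.Set.add, PySem.Set.contains, hc]
        · simp [PySem.Set.add, PySem.Set.contains, hc, List.filter_append, hp]
      rw [this]

-- ===== VERDICT (by name: the statement is the Claim_ definition above) =====
theorem canonicalize_terms_py_spec : Claim_equal_canonicalize_terms_py := by
  intro raw allowed _
  unfold Spec_canonicalize_terms_py canonicalize_terms_py canonicalize_terms_py_alt
  have hl : (fun (st : List String × List String × PySem.Set String × PySem.Set String) value =>
      let (canonical, other, seen_canonical, seen_other) := st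
      let cleaned := PySem.Str.lower (PySem.Str.strip value)
      if cleaned == "" then st
      else if allowed.contains cleaned then
        if !seen_canonical.contains cleaned then
          (canonical ++ [cleaned], other, PySem.Set.add seen_canonical cleaned, seen_other)
        else st
      else if !seen_other.contains cleaned then
        (canonical, other ++ [cleaned], seen_canonical, PySem.Set.add seen_other cleaned)
      else st) = fun st v => pvStep allowed st (PySem.Str.lower (PySem.Str.strip v)) := by
    funext st v
    rcases st with ⟨a, b, sc, so⟩
    rfl
  rw [hl, ← List.foldl_map,
    fold_skip_empty, fold_g allowed _ [] []
      (by intro c hc; simpa using (List.mem_filter.mp hc).2),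
    PySem.List.dedup_eq_ofList, PySem.Set.ofList_eq_foldl]
  simp only [filter_foldl_add, List.filter_nil]
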